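-- pv_equiv track=rewrite | github.com/viggo-gascou/EuroEval | src/scripts/create_poner.py | create_label_mapping
-- ===== SOURCE A (Python) =====
-- def create_label_mapping(label_names: list[str]) -> dict[int, str]:
--     """Create mapping from PONER labels to standard BIO labels.
--
--     Args:
--         label_names: The list of label names.
--
--     Returns:
--         The mapping from PONER labels to standard BIO labels.
--     """
--     # Define a base mapping for the label prefixes
--     base_mapping = {
--         "B-p": "B-PER",
--         "I-p": "I-PER",
--         "B-i": "B-ORG",
--         "I-i": "I-ORG",
--         "B-g": "B-LOC",
--         "I-g": "I-LOC",
--         "B-t": "B-MISC",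
--         "I-t": "I-MISC",
--         "B-o": "B-MISC",
--         "I-o": "I-MISC",
--     }
--
--     # Create the mapping using the base mapping
--     mapping = {
--         i: base_mapping.get(label_name, "O") for i, label_name in enumerate(label_names)
--     }
--
--     return mapping
-- ===== SOURCE B (Python) =====
-- ENTITY = {"p": "PER", "i": "ORG", "g": "LOC", "t": "MISC", "o": "MISC"}
--
--
-- def create_label_mapping(label_names: list[str]) -> dict[int, str]:
--     """Create mapping from PONER labels to standard BIO labels.
--
--     Decomposes each label into its B/I prefix and entity letter instead of a
--     flat 10-entry full-string table.
--     """
--     mapping = {}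
--     for i, label in enumerate(label_names):
--         tag = "O"
--         if len(label) == 3 and label[1] == "-" and label[0] in "BI":
--             ent = ENTITY.get(label[2])
--             if ent is not None:
--                 tag = label[0] + "-" + ent
--         mapping[i] = tag
--     return mapping
-- ===== Notes on version B (the rewrite author's own statement) =====
-- stated objective: simpler
-- what changed: B replaces A's flat 10-entry full-string prefix table with a 5-entry entity-letter map plus a shape guard (len==3, '-' in the middle, 'B'/'I' prefix), recomposing the tag from its B/I prefix and entity letter, and builds the mapping in an explicit loop instead of a dict comprehension.
import Mathlib
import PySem

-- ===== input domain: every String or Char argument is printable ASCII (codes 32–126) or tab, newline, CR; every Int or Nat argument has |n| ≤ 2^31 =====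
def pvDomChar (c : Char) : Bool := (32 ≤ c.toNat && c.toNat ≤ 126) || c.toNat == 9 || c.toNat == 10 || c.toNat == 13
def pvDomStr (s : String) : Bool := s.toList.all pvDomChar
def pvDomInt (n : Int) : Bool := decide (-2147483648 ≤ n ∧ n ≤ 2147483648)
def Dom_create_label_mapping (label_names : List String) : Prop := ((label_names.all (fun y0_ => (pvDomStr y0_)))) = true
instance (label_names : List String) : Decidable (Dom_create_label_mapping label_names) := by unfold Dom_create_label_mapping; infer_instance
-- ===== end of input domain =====

-- B factors each label into its B/I prefix and entity letter (5-entry letter map + guard)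
-- instead of A's flat 10-entry full-string table; objective: simpler decomposition, same cost.

-- ===== PORT A =====
def pvBase : PySem.Dict String String := PySem.Dict.ofList
  [("B-p", "B-PER"), ("I-p", "I-PER"), ("B-i", "B-ORG"), ("I-i", "I-ORG"),
   ("B-g", "B-LOC"), ("I-g", "I-LOC"), ("B-t", "B-MISC"), ("I-t", "I-MISC"),
   ("B-o", "B-MISC"), ("I-o", "I-MISC")]

def create_label_mapping (label_names : List String) : List (Int × String) :=
  (PySem.List.enumerate label_names).map (fun p => (p.1, pvBase.getD p.2 "O"))

-- ===== PORT B =====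
def pvEntity : PySem.Dict Char String := PySem.Dict.ofList
  [('p', "PER"), ('i', "ORG"), ('g', "LOC"), ('t', "MISC"), ('o', "MISC")]

def pvTag (label : String) : String :=
  match label.toList with
  | [b, d, e] =>
    if d = '-' ∧ (b = 'B' ∨ b = 'I') then
      match pvEntity.get? e with
      | some ent => String.ofList (b :: '-' :: ent.toList)
      | none => "O"
    else "O"
  | _ => "O"

def create_label_mapping_alt (label_names : List String) : List (Int × String) :=
  (PySem.List.enumerate label_names).foldl (fun acc p => acc ++ [(p.1, pvTag p.2)]) []

-- ===== PRECONDITION & SPEC =====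
def Spec_create_label_mapping (label_names : List String) (out : List (Int × String)) : Prop := out = create_label_mapping_alt label_names
instance (label_names : List String) (out : List (Int × String)) : Decidable (Spec_create_label_mapping label_names out) := by unfold Spec_create_label_mapping; infer_instance

-- ===== CLAIM (what is proved, stated in full; the proofs are below) =====
def Claim_equal_create_label_mapping : Prop := ∀ (label_names : List String), Dom_create_label_mapping label_names → Spec_create_label_mapping label_names (create_label_mapping label_names)

-- ===== LEMMAS AND PROOFS =====
lemma pv_ofList_eq_iff (cs : List Char) (s : String) : String.ofList cs = s ↔ cs = s.toList := by
  constructor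
  · intro h; rw [← h, String.toList_ofList]
  · intro h; rw [h, String.ofList_toList]

lemma pvTag_eq (l : String) : pvBase.getD l "O" = pvTag l := by
  have hl : l = String.ofList l.toList := String.ofList_toList.symm
  rw [hl]; generalize l.toList = cs
  simp only [pvTag, pvBase, PySem.Dict.ofList, PySem.Dict.update, List.foldl,
    PySem.Dict.getD_insert, PySem.Dict.getD_empty, String.toList_ofList, pv_ofList_eq_iff,
    show ("B-p":String).toList = ['B','-','p'] from rfl,
    show ("I-p":String).toList = ['I','-','p'] from rfl,
    show ("B-i":String).toList = ['B','-','i'] from rfl,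
    show ("I-i":String).toList = ['I','-','i'] from rfl,
    show ("B-g":String).toList = ['B','-','g'] from rfl,
    show ("I-g":String).toList = ['I','-','g'] from rfl,
    show ("B-t":String).toList = ['B','-','t'] from rfl,
    show ("I-t":String).toList = ['I','-','t'] from rfl,
    show ("B-o":String).toList = ['B','-','o'] from rfl,
    show ("I-o":String).toList = ['I','-','o'] from rfl]
  rcases cs with _ | ⟨b, _ | ⟨d, _ | ⟨e, _ | ⟨f, t⟩⟩⟩⟩
  · simp
  · simp
  · simp
  · by_cases hd : d = '-'
    · subst hd
      by_cases hb : b = 'B'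
      · subst hb
        by_cases h1 : e = 'p'; · subst h1; decide
        by_cases h2 : e = 'i'; · subst h2; decide
        by_cases h3 : e = 'g'; · subst h3; decide
        by_cases h4 : e = 't'; · subst h4; decide
        by_cases h5 : e = 'o'; · subst h5; decide
        simp [pvEntity, PySem.Dict.ofList, PySem.Dict.update, List.foldl,
          PySem.Dict.get?_insert, PySem.Dict.get?_empty, h1, h2, h3, h4, h5]
      · by_cases hb2 : b = 'I'
        · subst hb2
          by_cases h1 : e = 'p'; · subst h1; decide
          by_cases h2 : e = 'i'; · subst h2; decide
          by_cases h3 : e = 'g'; · subst h3; decide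
          by_cases h4 : e = 't'; · subst h4; decide
          by_cases h5 : e = 'o'; · subst h5; decide
          simp [pvEntity, PySem.Dict.ofList, PySem.Dict.update, List.foldl,
            PySem.Dict.get?_insert, PySem.Dict.get?_empty, h1, h2, h3, h4, h5]
        · simp [hb, hb2]
    · simp [hd]
  · simp

-- ===== VERDICT (by name: the statement is the Claim_ definition above) =====
theorem create_label_mapping_spec : Claim_equal_create_label_mapping := by
  intro ln _
  unfold Spec_create_label_mapping create_label_mapping create_label_mapping_alt
  rw [PySem.List.foldl_append_singleton_eq_map]
  exact List.map_congr_left (fun p _ => by rw [pvTag_eq])
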